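-- pv_equiv track=rewrite | github.com/br0der/VsCode | discreteProject3.py | partC
-- ===== SOURCE A (Python) =====
-- def partC(n):
--     T = [0, 16]
--     for i in range(n-2):
--         currN = len(T)+1
--         pt1 =   T[-1] * \
--                 currN * \
--                 (currN-1) * \
--                 4
--         pt2 =   T[-2] * \
--                 (currN-1) * \
--                 ((currN*(currN-1))//2) * \
--                 16
--         T.append(pt1+pt2)
--     return T[n-1]
-- ===== SOURCE B (Python) =====
-- def partC(n):
--     if n < 2:
--         return [0, 16][n - 1]
--
--     def mat(p):
--         # transition matrix taking (T[p-2], T[p-1]) to (T[p-1], T[p])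
--         return (0, 1, 8 * p * p * (p + 1), 4 * p * (p + 1))
--
--     def mul(m, k):
--         a, b, c, d = m
--         e, f, g, h = k
--         return (a * e + b * g, a * f + b * h, c * e + d * g, c * f + d * h)
--
--     def prod(lo, hi):
--         # product mat(hi) * ... * mat(lo), computed by range halving
--         if lo > hi:
--             return (1, 0, 0, 1)
--         if lo == hi:
--             return mat(lo)
--         mid = (lo + hi) // 2
--         return mul(prod(mid + 1, hi), prod(lo, mid))
--
--     # (T[n-2], T[n-1]) = prod(2, n-1) applied to (0, 16)
--     return 16 * prod(2, n - 1)[3]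
-- ===== Notes on version B (the rewrite author's own statement) =====
-- stated objective: alternative
-- what changed: B replaces A's sequential list-building sweep by a divide-and-conquer product of 2x2 transition matrices of the linear recurrence: (T[n-2],T[n-1]) = M(n-1)...M(2)*(0,16), the product computed by recursive range halving, then 16*P[1][1] is returned.
-- outside the precondition, e.g. on partC(-2): A raises IndexError, B raises IndexError
import Mathlib
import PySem

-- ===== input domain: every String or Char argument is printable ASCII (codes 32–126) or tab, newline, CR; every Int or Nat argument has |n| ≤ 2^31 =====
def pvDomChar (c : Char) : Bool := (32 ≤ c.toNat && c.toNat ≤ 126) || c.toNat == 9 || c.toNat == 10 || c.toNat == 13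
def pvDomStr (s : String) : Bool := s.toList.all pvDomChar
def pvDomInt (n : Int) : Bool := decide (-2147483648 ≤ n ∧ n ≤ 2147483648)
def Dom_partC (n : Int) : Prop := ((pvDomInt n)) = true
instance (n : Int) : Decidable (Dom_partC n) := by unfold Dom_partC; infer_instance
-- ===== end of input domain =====

-- B recasts A's list-building recurrence sweep as a divide-and-conquer product of 2x2 transition matrices (alternative algorithm).

-- ===== PORT A =====
def stepA (T : List Int) (_ : Int) : List Int :=
  let currN : Int := (T.length : Int) + 1
  let pt1 := PySem.List.pyGetD T (-1) 0 * currN * (currN - 1) * 4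
  let pt2 := PySem.List.pyGetD T (-2) 0 * (currN - 1) *
             (PySem.Int.floordiv (currN * (currN - 1)) 2) * 16
  T ++ [pt1 + pt2]

def partC (n : Int) : Int :=
  PySem.List.pyGetD ((PySem.List.pyRange 0 (n - 2) 1).foldl stepA [0, 16]) (n - 1) 0

-- ===== PORT B =====
-- transition matrix taking (T[p-2], T[p-1]) to (T[p-1], T[p])
def matB (p : Int) : Int × Int × Int × Int :=
  (0, 1, 8 * p * p * (p + 1), 4 * p * (p + 1))

def mulB (m k : Int × Int × Int × Int) : Int × Int × Int × Int :=
  (m.1 * k.1 + m.2.1 * k.2.2.1, m.1 * k.2.1 + m.2.1 * k.2.2.2,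
   m.2.2.1 * k.1 + m.2.2.2 * k.2.2.1, m.2.2.1 * k.2.1 + m.2.2.2 * k.2.2.2)

-- product matB hi * ... * matB lo, computed by range halving (mid inlined);
-- the Nat fuel only makes the recursion structural: (hi+1-lo).toNat bounds the depth
def prodBF : Nat → Int → Int → Int × Int × Int × Int
  | 0, _, _ => (1, 0, 0, 1)
  | fuel + 1, lo, hi =>
    if lo > hi then (1, 0, 0, 1)
    else if lo = hi then matB lo
    else
      mulB (prodBF fuel (PySem.Int.floordiv (lo + hi) 2 + 1) hi)
           (prodBF fuel lo (PySem.Int.floordiv (lo + hi) 2))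

def prodB (lo hi : Int) : Int × Int × Int × Int :=
  prodBF (hi + 1 - lo).toNat lo hi

def partC_alt (n : Int) : Int :=
  if n < 2 then PySem.List.pyGetD [0, 16] (n - 1) 0
  else 16 * (prodB 2 (n - 1)).2.2.2

-- ===== PRECONDITION & SPEC =====
-- Pre_ excludes n ≤ -2, where A's T[n-1] raises IndexError (T always has length ≥ 2).
def Pre_partC (n : Int) : Prop := -1 ≤ n
instance (n : Int) : Decidable (Pre_partC n) := by unfold Pre_partC; infer_instance
def pvWitness_partC : Int := 6

def Spec_partC (n : Int) (out : Int) : Prop := out = partC_alt n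
instance (n : Int) (out : Int) : Decidable (Spec_partC n out) := by unfold Spec_partC; infer_instance

-- ===== CLAIM (what is proved, stated in full; the proofs are below) =====
def Claim_equal_partC : Prop := ∀ (n : Int), Dom_partC n → Pre_partC n → Spec_partC n (partC n)

-- ===== LEMMAS AND PROOFS =====

lemma mulB_assoc (x y z : Int × Int × Int × Int) :
    mulB (mulB x y) z = mulB x (mulB y z) := by
  obtain ⟨a, b, c, d⟩ := x; obtain ⟨e, f, g, h⟩ := y; obtain ⟨i, j, k, l⟩ := z
  simp only [mulB, Prod.mk.injEq]
  refine ⟨by ring, by ring, by ring, by ring⟩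

lemma mulB_one_left (x : Int × Int × Int × Int) : mulB (1, 0, 0, 1) x = x := by
  obtain ⟨a, b, c, d⟩ := x
  simp only [mulB, Prod.mk.injEq]
  refine ⟨by ring, by ring, by ring, by ring⟩

lemma mulB_one_right (x : Int × Int × Int × Int) : mulB x (1, 0, 0, 1) = x := by
  obtain ⟨a, b, c, d⟩ := x
  simp only [mulB, Prod.mk.injEq]
  refine ⟨by ring, by ring, by ring, by ring⟩

-- the same product taken one factor at a time (right-to-left), for reasoning
def seqF : Nat → Int → Int → Int × Int × Int × Int
  | 0, _, _ => (1, 0, 0, 1)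
  | fuel + 1, lo, hi =>
    if hi < lo then (1, 0, 0, 1)
    else mulB (matB hi) (seqF fuel lo (hi - 1))

def seqB (lo hi : Int) : Int × Int × Int × Int :=
  seqF (hi + 1 - lo).toNat lo hi

lemma seqF_congr (f1 : Nat) : ∀ (f2 : Nat) (lo hi : Int), (hi + 1 - lo).toNat ≤ f1 →
    (hi + 1 - lo).toNat ≤ f2 → seqF f1 lo hi = seqF f2 lo hi := by
  induction f1 with
  | zero =>
    intro f2 lo hi h1 h2
    cases f2 with
    | zero => rfl
    | succ f2 => simp only [seqF]; rw [if_pos (by omega)]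
  | succ f1 ih =>
    intro f2 lo hi h1 h2
    cases f2 with
    | zero => simp only [seqF]; rw [if_pos (by omega)]
    | succ f2 =>
      simp only [seqF]
      by_cases h : hi < lo
      · rw [if_pos h, if_pos h]
      · rw [if_neg h, if_neg h, ih f2 lo (hi - 1) (by omega) (by omega)]

lemma seqB_empty (lo hi : Int) (h : hi < lo) : seqB lo hi = (1, 0, 0, 1) := by
  unfold seqB
  rw [show (hi + 1 - lo).toNat = 0 by omega]
  rfl

lemma seqB_step (lo hi : Int) (h : lo ≤ hi) :
    seqB lo hi = mulB (matB hi) (seqB lo (hi - 1)) := by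
  unfold seqB
  obtain ⟨f, hf⟩ : ∃ f : Nat, (hi + 1 - lo).toNat = f + 1 := ⟨(hi - lo).toNat, by omega⟩
  rw [hf]
  simp only [seqF]
  rw [if_neg (by omega), seqF_congr f ((hi - 1 + 1 - lo).toNat) lo (hi - 1) (by omega) le_rfl]

lemma seqB_split (lo mid hi : Int) (h1 : lo - 1 ≤ mid) (h2 : mid ≤ hi) :
    seqB lo hi = mulB (seqB (mid + 1) hi) (seqB lo mid) := by
  obtain ⟨k, hk⟩ : ∃ k : Nat, hi = mid + (k : Int) := ⟨(hi - mid).toNat, by omega⟩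
  subst hk
  induction k with
  | zero =>
    rw [show mid + ((0 : Nat) : Int) = mid by norm_num,
        seqB_empty (mid + 1) mid (by omega), mulB_one_left]
  | succ k ih =>
    have hgt : mid + ((k + 1 : Nat) : Int) - 1 = mid + (k : Int) := by push_cast; ring
    rw [seqB_step lo _ (by push_cast; omega), hgt, ih (by omega), ← mulB_assoc,
        ← hgt, ← seqB_step (mid + 1) _ (by push_cast; omega)]

lemma prodBF_eq_seqB (f : Nat) : ∀ (lo hi : Int), (hi + 1 - lo).toNat ≤ f →
    prodBF f lo hi = seqB lo hi := by
  induction f with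
  | zero =>
    intro lo hi h
    rw [seqB_empty lo hi (by omega)]
    rfl
  | succ f ih =>
    intro lo hi h
    simp only [prodBF]
    split_ifs with h1 h2
    · rw [seqB_empty lo hi (by omega)]
    · subst h2
      rw [seqB_step lo lo le_rfl, seqB_empty lo (lo - 1) (by omega), mulB_one_right]
    · have hb := PySem.Int.floordiv_two_mid_bounds (lo := lo) (hi := hi) (by omega)
      have hlt : PySem.Int.floordiv (lo + hi) 2 < hi := by
        rw [PySem.Int.floordiv_lt_iff_lt_mul (by omega)]; omega
      rw [ih _ _ (by omega), ih _ _ (by omega),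
          ← seqB_split lo (PySem.Int.floordiv (lo + hi) 2) hi (by omega) (by omega)]

lemma prodB_eq_seqB (lo hi : Int) : prodB lo hi = seqB lo hi :=
  prodBF_eq_seqB (hi + 1 - lo).toNat lo hi le_rfl

-- the pair (T[k], T[k+1]) obtained by applying the sequential product to (0, 16)
def vB (k : Nat) : Int × Int :=
  ((seqB 2 ((k : Int) + 1)).2.1 * 16, (seqB 2 ((k : Int) + 1)).2.2.2 * 16)

lemma getD_neg_two (L : List Int) (a b : Int) :
    PySem.List.pyGetD (L ++ [a, b]) (-2) 0 = a := by
  rw [PySem.List.pyGetD_neg_ofNat (L ++ [a, b]) 2 0 (by omega) (by simp)]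
  simp [List.getElem_append_right]

lemma getD_neg_one (L : List Int) (a b : Int) :
    PySem.List.pyGetD (L ++ [a, b]) (-1) 0 = b := by
  rw [show L ++ [a, b] = (L ++ [a]) ++ [b] by simp]
  exact PySem.List.pyGetD_neg_one_append_singleton _ _ _

lemma floordiv_even (k : Nat) :
    2 * PySem.Int.floordiv (((k : Int) + 2 + 1) * ((k : Int) + 2 + 1 - 1)) 2
      = ((k : Int) + 2 + 1) * ((k : Int) + 2 + 1 - 1) := by
  obtain ⟨m, hm⟩ : Even ((k + 2) * (k + 3)) := Nat.even_mul_succ_self (k + 2)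
  have h : ((k : Int) + 2 + 1) * ((k : Int) + 2 + 1 - 1) = 2 * (m : Int) := by
    have h2 : ((k + 2) * (k + 3) : Nat) = 2 * m := by omega
    have h3 := congrArg (fun x : Nat => (x : Int)) h2
    push_cast at h3
    linarith [h3]
  rw [h, PySem.Int.floordiv_eq_ediv_of_pos (by omega)]
  omega

lemma fold_inv (k : Nat) :
    ∃ L : List Int,
      (PySem.List.pyRange 0 (k : Int) 1).foldl stepA [0, 16]
        = L ++ [(vB k).1, (vB k).2] ∧ L.length = k := by
  induction k with
  | zero =>
    refine ⟨[], ?_, rfl⟩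
    have h1 : vB 0 = (0, 16) := by
      unfold vB
      rw [show ((0 : Nat) : Int) + 1 = 1 by norm_num, seqB_empty 2 1 (by omega)]
      decide
    rw [h1]
    decide
  | succ k ih =>
    obtain ⟨L, hL, hlen⟩ := ih
    have hcast : ((k + 1 : Nat) : Int) = (k : Int) + 1 := by push_cast; ring
    have hfd := floordiv_even k
    have hv : vB (k + 1)
        = ((vB k).2,
           (vB k).2 * ((k : Int) + 2 + 1) * ((k : Int) + 2 + 1 - 1) * 4
             + (vB k).1 * ((k : Int) + 2 + 1 - 1) *
               PySem.Int.floordiv (((k : Int) + 2 + 1) * ((k : Int) + 2 + 1 - 1)) 2 * 16) := by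
      unfold vB
      rw [hcast, seqB_step 2 ((k : Int) + 1 + 1) (by omega),
          show (k : Int) + 1 + 1 - 1 = (k : Int) + 1 by ring]
      simp only [mulB, matB, Prod.mk.injEq]
      constructor
      · ring
      · linear_combination ((-128 : Int) * ((k : Int) + 2) * (seqB 2 ((k : Int) + 1)).2.1) * hfd
    refine ⟨L ++ [(vB k).1], ?_, by simp [hlen]⟩
    rw [hcast, PySem.List.pyRange_one_succ_right (by omega)]
    simp only [List.foldl_append, List.foldl_cons, List.foldl_nil, hL]
    unfold stepA
    simp only [getD_neg_one, getD_neg_two, List.length_append, List.length_cons,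
      List.length_nil, hlen, List.append_assoc, List.cons_append, List.nil_append]
    rw [hv, show ((k + (0 + 1 + 1) : Nat) : Int) + 1 = (k : Int) + 2 + 1 by push_cast; ring]

lemma getD_last (L : List Int) (a b : Int) :
    PySem.List.pyGetD (L ++ [a, b]) ((L.length : Int) + 1) 0 = b := by
  have : ((L.length : Int) + 1) = ((L.length + 1 : Nat) : Int) := by push_cast; ring
  rw [this, PySem.List.pyGetD_natCast]
  simp [List.getD]

-- ===== VERDICT (by name: the statement is the Claim_ definition above) =====
theorem partC_spec : Claim_equal_partC := by
  intro n _ hpre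
  unfold Spec_partC
  by_cases h : n < 2
  · have h1 : -1 ≤ n := hpre
    interval_cases n <;> decide
  · obtain ⟨k, hk⟩ : ∃ k : Nat, n = (k : Int) + 2 := ⟨(n - 2).toNat, by omega⟩
    subst hk
    obtain ⟨L, hL, hlen⟩ := fold_inv k
    unfold partC partC_alt
    rw [show (k : Int) + 2 - 2 = (k : Int) by ring, hL, if_neg (by omega)]
    have hget : PySem.List.pyGetD (L ++ [(vB k).1, (vB k).2]) ((k : Int) + 2 - 1) 0
        = (vB k).2 := by
      rw [show (k : Int) + 2 - 1 = ((L.length : Int) + 1) by omega]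
      exact getD_last _ _ _
    rw [hget, show (k : Int) + 2 - 1 = (k : Int) + 1 by ring, prodB_eq_seqB]
    unfold vB
    ring
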